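-- pv_equiv track=rewrite | github.com/OthmanMohamed/pyarabic_dates | new_detect_date.py | prepare_input
-- ===== SOURCE A (Python) =====
-- def prepare_input(txt):
--     return_txts = []
--     temp_t = ""
--     for i, t in enumerate(txt):
--         if not t.strip():
--             if i+1<len(txt) and (not txt[i+1].strip()):
--                 continue
--             else:
--                 if temp_t:
--                     return_txts.append(temp_t)
--                     temp_t = ""
--                 return_txts.append(t)
--         else:
--             temp_t += " " + t
--     else:
--         if temp_t:
--             return_txts.append(temp_t)
--             temp_t = ""
--     return return_txts
-- ===== SOURCE B (Python) =====
-- def prepare_input(txt):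
--     res = []
--     i, n = 0, len(txt)
--     while i < n:
--         blank = not txt[i].strip()
--         j = i
--         while j < n and (not txt[j].strip()) == blank:
--             j += 1
--         if blank:
--             res.append(txt[j - 1])
--         else:
--             s = ""
--             for k in range(i, j):
--                 s += " " + txt[k]
--             res.append(s)
--         i = j
--     return res
-- ===== Notes on version B (the rewrite author's own statement) =====
-- stated objective: alternative
-- what changed: Replaces A's index-lookahead flush state machine with a run-grouping two-pointer pass: split the input into maximal blank/non-blank runs, emit the last element of each blank run and the ' '-prefixed join of each non-blank run.
import Mathlib
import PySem

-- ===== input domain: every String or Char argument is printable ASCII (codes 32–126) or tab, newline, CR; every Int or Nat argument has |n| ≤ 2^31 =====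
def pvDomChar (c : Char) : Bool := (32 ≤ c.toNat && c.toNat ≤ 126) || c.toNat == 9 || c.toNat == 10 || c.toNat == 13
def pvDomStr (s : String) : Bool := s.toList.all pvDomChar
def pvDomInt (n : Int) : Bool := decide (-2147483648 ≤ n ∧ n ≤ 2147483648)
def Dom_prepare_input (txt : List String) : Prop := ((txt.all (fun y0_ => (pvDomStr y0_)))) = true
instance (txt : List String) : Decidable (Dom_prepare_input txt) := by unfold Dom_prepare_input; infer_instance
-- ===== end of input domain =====

-- B replaces A's index-lookahead flush state machine by a pass over maximal blank/non-blank
-- runs (alternative decomposition, same cost); the return values agree on all inputs.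

-- ===== PORT A =====
-- literal transliteration of A's for-enumerate loop: index i, current token t,
-- loop state (return_txts, temp_t), lookahead txt[i+1] via pyGet?
def prepare_input_go (txt : List String) : Nat → List String → List String → String → List String
  | _, [], ret, temp => if temp ≠ "" then ret ++ [temp] else ret
  | i, t :: rest, ret, temp =>
    if PySem.Str.strip t == "" then
      if decide ((i : Int) + 1 < (txt.length : Int)) &&
         (PySem.Str.strip ((PySem.List.pyGet? txt ((i : Int) + 1)).getD "") == "") then
        prepare_input_go txt (i + 1) rest ret temp
      else
        prepare_input_go txt (i + 1) rest ((if temp ≠ "" then ret ++ [temp] else ret) ++ [t]) ""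
    else
      prepare_input_go txt (i + 1) rest ret (temp ++ " " ++ t)

def prepare_input (txt : List String) : List String := prepare_input_go txt 0 txt [] ""

-- ===== PORT B =====
-- run-grouping: split off the maximal run of tokens with the same blankness as the head;
-- a blank run contributes its last element (run[-1]), a non-blank run its ' '-prefixed join
def prepare_input_alt : List String → List String
  | [] => []
  | t :: rest =>
    (if PySem.Str.strip t == "" then
        PySem.List.pyGetD
          ((t :: rest).takeWhile (fun u => (PySem.Str.strip u == "") == (PySem.Str.strip t == ""))) (-1) ""
      else
        ((t :: rest).takeWhile (fun u => (PySem.Str.strip u == "") == (PySem.Str.strip t == ""))).foldl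
          (fun s u => s ++ " " ++ u) "")
    :: prepare_input_alt
        ((t :: rest).dropWhile (fun u => (PySem.Str.strip u == "") == (PySem.Str.strip t == "")))
  termination_by l => l.length
  decreasing_by
    simp only [List.dropWhile_cons, beq_self_eq_true, if_pos, List.length_cons]
    exact Nat.lt_succ_of_le (List.length_dropWhile_le _ _)

-- ===== PRECONDITION & SPEC =====
def Spec_prepare_input (txt : List String) (out : List String) : Prop := out = prepare_input_alt txt
instance (txt : List String) (out : List String) : Decidable (Spec_prepare_input txt out) := by unfold Spec_prepare_input; infer_instance

-- ===== CLAIM (what is proved, stated in full; the proofs are below) =====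
def Claim_equal_prepare_input : Prop := ∀ (txt : List String), Dom_prepare_input txt → Spec_prepare_input txt (prepare_input txt)

-- ===== LEMMAS AND PROOFS =====

theorem pv_beq_true (b : Bool) : (b == true) = b := by cases b <;> rfl

theorem pv_beq_false (b : Bool) : (b == false) = !b := by cases b <;> rfl

theorem pv_space_ne_empty (s t : String) : s ++ " " ++ t ≠ "" := by simp

-- A's lookahead `txt[i+1]` as a predicate on the not-yet-processed tail
def pvBlankNext : List String → Bool
  | [] => false
  | u :: _ => PySem.Str.strip u == ""

-- A's loop without the index bookkeeping (the lookahead becomes the head of the tail)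
def pvFA : List String → String → List String
  | [], temp => if temp ≠ "" then [temp] else []
  | t :: rest, temp =>
    if PySem.Str.strip t == "" then
      if pvBlankNext rest then pvFA rest temp
      else (if temp ≠ "" then [temp] else []) ++ [t] ++ pvFA rest ""
    else
      pvFA rest (temp ++ " " ++ t)

theorem pv_lookahead_eq (pre rest : List String) (t : String) :
    (decide (((pre.length : Nat) : Int) + 1 < (((pre ++ t :: rest).length : Nat) : Int)) &&
      (PySem.Str.strip ((PySem.List.pyGet? (pre ++ t :: rest) (((pre.length : Nat) : Int) + 1)).getD "") == ""))
    = pvBlankNext rest := by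
  cases rest with
  | nil =>
    have hlt : ¬ (((pre.length : Nat) : Int) + 1 < (((pre ++ [t]).length : Nat) : Int)) := by
      simp only [List.length_append, List.length_cons, List.length_nil]
      push_cast
      omega
    rw [decide_eq_false hlt, Bool.false_and]
    rfl
  | cons u rs =>
    have hlt : (((pre.length : Nat) : Int) + 1 < (((pre ++ t :: u :: rs).length : Nat) : Int)) := by
      simp only [List.length_append, List.length_cons, List.length_nil]
      push_cast
      omega
    have hget : PySem.List.pyGet? (pre ++ t :: u :: rs) (((pre.length : Nat) : Int) + 1) = some u := by
      have hcast : ((pre.length : Nat) : Int) + 1 = (((pre.length + 1 : Nat)) : Int) := by push_cast; ring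
      rw [hcast, PySem.List.pyGet?_natCast, List.getElem?_append_right (by omega)]
      simp
    rw [decide_eq_true hlt, Bool.true_and, hget]
    rfl

theorem pv_go_eq_fA (cur : List String) : ∀ (pre ret : List String) (temp : String),
    prepare_input_go (pre ++ cur) pre.length cur ret temp = ret ++ pvFA cur temp := by
  induction cur with
  | nil =>
    intro pre ret temp
    by_cases ht : temp ≠ "" <;> simp [prepare_input_go, pvFA, ht]
  | cons t rest ih =>
    intro pre ret temp
    simp only [prepare_input_go]
    rw [pv_lookahead_eq]
    by_cases hb : (PySem.Str.strip t == "") = true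
    · cases hn : pvBlankNext rest with
      | true =>
        have h := ih (pre ++ [t]) ret temp
        simp only [List.length_append, List.length_cons, List.length_nil, Nat.zero_add,
          List.append_assoc, List.singleton_append] at h
        simp only [hb, hn, eq_self_iff_true, if_true]
        rw [h]
        simp [pvFA, hb, hn]
      | false =>
        have h := ih (pre ++ [t]) ((if temp ≠ "" then ret ++ [temp] else ret) ++ [t]) ""
        simp only [List.length_append, List.length_cons, List.length_nil, Nat.zero_add,
          List.append_assoc, List.singleton_append] at h
        simp only [hb, hn, eq_self_iff_true, if_true, Bool.false_eq_true, if_false]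
        rw [h]
        simp only [pvFA, hb, hn, eq_self_iff_true, if_true, Bool.false_eq_true, if_false]
        by_cases ht : temp ≠ "" <;> simp [ht, List.append_assoc]
    · rw [Bool.not_eq_true] at hb
      have h := ih (pre ++ [t]) ret (temp ++ " " ++ t)
      simp only [List.length_append, List.length_cons, List.length_nil, Nat.zero_add,
        List.append_assoc, List.singleton_append] at h
      simp only [hb, Bool.false_eq_true, if_false]
      rw [h]
      simp [pvFA, hb]

theorem pvA_eq_fA (txt : List String) : prepare_input txt = pvFA txt "" := by
  have h := pv_go_eq_fA txt [] [] ""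
  simpa [prepare_input] using h

theorem pv_pyGetD_neg_one_cons (t u : String) (xs : List String) :
    PySem.List.pyGetD (t :: u :: xs) (-1) "" = PySem.List.pyGetD (u :: xs) (-1) "" := by
  rw [show PySem.List.pyGetD (t :: u :: xs) (-1) "" = (PySem.List.pyGet? (t :: u :: xs) (-1)).getD "" from rfl,
      show PySem.List.pyGetD (u :: xs) (-1) "" = (PySem.List.pyGet? (u :: xs) (-1)).getD "" from rfl,
      PySem.List.pyGet?_neg_one, PySem.List.pyGet?_neg_one, List.getLast?_cons_cons]

theorem pv_alt_blank_nonnext (t : String) (rest : List String)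
    (hb : (PySem.Str.strip t == "") = true) (hn : pvBlankNext rest = false) :
    prepare_input_alt (t :: rest) = t :: prepare_input_alt rest := by
  cases rest with
  | nil => simp [prepare_input_alt, hb, PySem.List.pyGetD_neg_one]
  | cons u rs =>
    have hu : (PySem.Str.strip u == "") = false := by simpa [pvBlankNext] using hn
    simp [prepare_input_alt, hb, hu, PySem.List.pyGetD_neg_one]

theorem pv_alt_blank_blank (t u : String) (rs : List String)
    (hb : (PySem.Str.strip t == "") = true) (hu : (PySem.Str.strip u == "") = true) :
    prepare_input_alt (t :: u :: rs) = prepare_input_alt (u :: rs) := by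
  simp only [prepare_input_alt, hb, hu, pv_beq_true, eq_self_iff_true, if_true,
    List.takeWhile_cons, List.dropWhile_cons]
  rw [pv_pyGetD_neg_one_cons]

-- the target shape of A's loop body, expressed through prepare_input_alt
def pvT (l : List String) (temp : String) : List String :=
  match l with
  | [] => if temp ≠ "" then [temp] else []
  | t :: rest =>
    if PySem.Str.strip t == "" then
      (if temp ≠ "" then [temp] else []) ++ prepare_input_alt (t :: rest)
    else
      ((t :: rest).takeWhile (fun u => !(PySem.Str.strip u == ""))).foldl (fun s u => s ++ " " ++ u) temp
        :: prepare_input_alt ((t :: rest).dropWhile (fun u => !(PySem.Str.strip u == "")))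

theorem pv_alt_nonblank (t : String) (rest : List String)
    (hb : (PySem.Str.strip t == "") = false) :
    prepare_input_alt (t :: rest) = pvT (t :: rest) "" := by
  simp [prepare_input_alt, pvT, hb, pv_beq_false]

theorem pvT_empty (l : List String) : pvT l "" = prepare_input_alt l := by
  cases l with
  | nil => simp [pvT, prepare_input_alt]
  | cons t rest =>
    by_cases hb : (PySem.Str.strip t == "") = true
    · simp [pvT, hb]
    · rw [Bool.not_eq_true] at hb
      rw [pv_alt_nonblank t rest hb]

theorem pv_fA_eq_T (l : List String) : ∀ temp, pvFA l temp = pvT l temp := by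
  induction l with
  | nil => intro temp; rfl
  | cons t rest ih =>
    intro temp
    by_cases hb : (PySem.Str.strip t == "") = true
    · cases hn : pvBlankNext rest with
      | true =>
        cases rest with
        | nil => simp [pvBlankNext] at hn
        | cons u rs =>
          have hu : (PySem.Str.strip u == "") = true := by simpa [pvBlankNext] using hn
          have h1 : pvFA (t :: u :: rs) temp = pvFA (u :: rs) temp := by
            simp [pvFA, hb, pvBlankNext, hu]
          rw [h1, ih temp]
          simp only [pvT, hb, hu, eq_self_iff_true, if_true]
          rw [pv_alt_blank_blank t u rs hb hu]
      | false =>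
        have h1 : pvFA (t :: rest) temp
            = ((if temp ≠ "" then [temp] else []) ++ [t]) ++ pvFA rest "" := by
          simp [pvFA, hb, hn]
        rw [h1, ih "", pvT_empty]
        simp only [pvT, hb, eq_self_iff_true, if_true]
        rw [pv_alt_blank_nonnext t rest hb hn]
        simp [List.append_assoc]
    · rw [Bool.not_eq_true] at hb
      have h1 : pvFA (t :: rest) temp = pvFA rest (temp ++ " " ++ t) := by
        simp [pvFA, hb]
      rw [h1, ih (temp ++ " " ++ t)]
      cases rest with
      | nil =>
        simp [pvT, hb, pv_space_ne_empty, prepare_input_alt]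
      | cons u rs =>
        by_cases hu : (PySem.Str.strip u == "") = true
        · simp [pvT, hb, hu, pv_space_ne_empty]
        · rw [Bool.not_eq_true] at hu
          simp [pvT, hb, hu]

-- ===== VERDICT (by name: the statement is the Claim_ definition above) =====
theorem prepare_input_spec : Claim_equal_prepare_input := by
  intro txt _
  unfold Spec_prepare_input
  rw [pvA_eq_fA txt, pv_fA_eq_T txt "", pvT_empty txt]
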